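-- pv_equiv track=rewrite | github.com/YudaiTamura/information-fluency-python | crop_triangles.py | solve_simply
-- ===== SOURCE A (Python) =====
-- def generate_points(n, a, b, c, d, x_0, y_0, m):
-- 	x = x_0
-- 	y = y_0
-- 	point = [(x, y)]
-- 	for i in range(1, n):
-- 		x = ((a * x) + b) % m
-- 		y = ((c * y) + d) % m
-- 		point += [(x, y)]
-- 	return point
--
-- def is_center_integer(p1, p2, p3):
-- 	(x_1, y_1) = p1
-- 	(x_2, y_2) = p2
-- 	(x_3, y_3) = p3
-- 	if (x_1 + x_2 + x_3) % 3 == 0 and (y_1 + y_2 + y_3) % 3 == 0: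
-- 		return True
-- 	else:
-- 		return False
--
-- def solve_simply(n, a, b, c, d, x_0, y_0, m):
-- 	point = generate_points(n, a, b, c, d, x_0, y_0, m) # まず先述の関数generage_pointsを使って，点集合を生成する．
--
-- 	count = 0
-- 	for i in range(n - 2):
-- 		for j in range(i + 1, n - 1):
-- 			for k in range(j + 1, n):
-- 				if is_center_integer(point[i], point[j], point[k]) == True:
-- 					count += 1
-- 	return count
-- ===== SOURCE B (Python) =====
-- def _process(single, pair, count, x, y):
--     # fold one point with coordinates (x, y) into the residue-class tables
--     rx = x % 3
--     ry = y % 3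
--     count += pair[3 * ((-rx) % 3) + (-ry) % 3]
--     pair = [pair[k] + single[3 * ((k // 3 - rx) % 3) + (k % 3 - ry) % 3] for k in range(9)]
--     single = [single[s] + (1 if s == 3 * rx + ry else 0) for s in range(9)]
--     return single, pair, count
--
-- def solve_simply(n, a, b, c, d, x_0, y_0, m):
--     single = [0] * 9
--     pair = [0] * 9
--     count = 0
--     x, y = x_0, y_0
--     single, pair, count = _process(single, pair, count, x, y)
--     for i in range(1, n):
--         x = ((a * x) + b) % m
--         y = ((c * y) + d) % m
--         single, pair, count = _process(single, pair, count, x, y)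
--     return count
-- ===== Notes on version B (the rewrite author's own statement) =====
-- stated objective: faster
-- what changed: B replaces A's cubic triple loop over all index triples by a single pass that buckets points by their coordinate residues mod 3 and maintains running tables of residue-class counts and pair-sum counts, adding for each new point the number of earlier pairs whose residue sums complete a divisible-by-3 triple.
import Mathlib
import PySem

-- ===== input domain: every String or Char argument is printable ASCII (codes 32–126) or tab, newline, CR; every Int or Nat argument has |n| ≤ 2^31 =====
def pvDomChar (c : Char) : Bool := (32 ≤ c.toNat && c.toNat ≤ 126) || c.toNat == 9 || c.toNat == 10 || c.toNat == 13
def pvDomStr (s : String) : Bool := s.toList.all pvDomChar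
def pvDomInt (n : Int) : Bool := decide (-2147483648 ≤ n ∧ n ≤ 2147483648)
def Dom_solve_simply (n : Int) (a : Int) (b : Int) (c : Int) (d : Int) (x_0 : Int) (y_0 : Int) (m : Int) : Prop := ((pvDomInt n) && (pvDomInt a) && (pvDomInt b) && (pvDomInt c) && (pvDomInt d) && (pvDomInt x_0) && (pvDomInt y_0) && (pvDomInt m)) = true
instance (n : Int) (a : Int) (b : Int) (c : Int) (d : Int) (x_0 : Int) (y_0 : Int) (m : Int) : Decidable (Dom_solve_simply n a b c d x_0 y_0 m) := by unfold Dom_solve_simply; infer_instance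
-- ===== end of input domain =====

-- B replaces A's O(n^3) triple loop by a single O(n) pass over the points that buckets
-- residues mod 3 and maintains class/pair-sum count tables (objective: faster, asymptotic).

-- ===== PORT A =====
-- generate_points: builds the point list from the linear-congruential recurrence
def pvGenPoints (n : Int) (a : Int) (b : Int) (c : Int) (d : Int) (x_0 : Int) (y_0 : Int) (m : Int) : List (Int × Int) :=
  let st := (PySem.List.pyRange 1 n 1).foldl
    (fun (st : Int × Int × List (Int × Int)) _i =>
      let x := PySem.Int.mod (a * st.1 + b) m
      let y := PySem.Int.mod (c * st.2.1 + d) m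
      (x, y, st.2.2 ++ [(x, y)]))
    (x_0, y_0, [(x_0, y_0)])
  st.2.2

-- is_center_integer
def pvIsCenter (p1 : Int × Int) (p2 : Int × Int) (p3 : Int × Int) : Bool :=
  if PySem.Int.mod (p1.1 + p2.1 + p3.1) 3 == 0 && PySem.Int.mod (p1.2 + p2.2 + p3.2) 3 == 0
  then true else false

def solve_simply (n : Int) (a : Int) (b : Int) (c : Int) (d : Int) (x_0 : Int) (y_0 : Int) (m : Int) : Int :=
  let point := pvGenPoints n a b c d x_0 y_0 m
  -- indexing point[i] etc. by pyGetD: every index used is in range (see length lemmas below)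
  (PySem.List.pyRange 0 (n - 2) 1).foldl (fun count i =>
    (PySem.List.pyRange (i + 1) (n - 1) 1).foldl (fun count j =>
      (PySem.List.pyRange (j + 1) n 1).foldl (fun count k =>
        if pvIsCenter (PySem.List.pyGetD point i (0, 0)) (PySem.List.pyGetD point j (0, 0))
             (PySem.List.pyGetD point k (0, 0)) == true
        then count + 1 else count) count) count) 0

-- ===== PORT B =====
-- _process: fold one point into the residue tables (single = class counts, pair = pair-sum counts)
def pvProcess (st : List Int × List Int × Int) (x : Int) (y : Int) : List Int × List Int × Int :=
  let single := st.1
  let pair := st.2.1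
  let count := st.2.2
  let rx := PySem.Int.mod x 3
  let ry := PySem.Int.mod y 3
  let count := count + PySem.List.pyGetD pair (3 * PySem.Int.mod (-rx) 3 + PySem.Int.mod (-ry) 3) 0
  let pair := (PySem.List.pyRange 0 9 1).map (fun k =>
    PySem.List.pyGetD pair k 0 +
      PySem.List.pyGetD single
        (3 * PySem.Int.mod (PySem.Int.floordiv k 3 - rx) 3 + PySem.Int.mod (PySem.Int.mod k 3 - ry) 3) 0)
  let single := (PySem.List.pyRange 0 9 1).map (fun s =>
    PySem.List.pyGetD single s 0 + (if s == 3 * rx + ry then 1 else 0))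
  (single, pair, count)

def solve_simply_alt (n : Int) (a : Int) (b : Int) (c : Int) (d : Int) (x_0 : Int) (y_0 : Int) (m : Int) : Int :=
  let st0 : List Int × List Int × Int := (List.replicate 9 0, List.replicate 9 0, 0)
  let st1 := pvProcess st0 x_0 y_0
  let res := (PySem.List.pyRange 1 n 1).foldl
    (fun (st : Int × Int × (List Int × List Int × Int)) _i =>
      let x := PySem.Int.mod (a * st.1 + b) m
      let y := PySem.Int.mod (c * st.2.1 + d) m
      (x, y, pvProcess st.2.2 x y))
    (x_0, y_0, st1)
  res.2.2.2.2

-- ===== PRECONDITION & SPEC =====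
-- Pre_ excludes exactly the inputs where the Python raises ZeroDivisionError:
-- for n ≥ 2 both A and B compute '% m', so m = 0 raises (in A and in B alike).
def Pre_solve_simply (n : Int) (a : Int) (b : Int) (c : Int) (d : Int) (x_0 : Int) (y_0 : Int) (m : Int) : Prop :=
  n ≤ 1 ∨ m ≠ 0
instance (n : Int) (a : Int) (b : Int) (c : Int) (d : Int) (x_0 : Int) (y_0 : Int) (m : Int) : Decidable (Pre_solve_simply n a b c d x_0 y_0 m) := by unfold Pre_solve_simply; infer_instance

def pvWitness_solve_simply : Int × Int × Int × Int × Int × Int × Int × Int := (6, 2, 3, 4, 5, 1, 2, 7)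

def Spec_solve_simply (n : Int) (a : Int) (b : Int) (c : Int) (d : Int) (x_0 : Int) (y_0 : Int) (m : Int) (out : Int) : Prop := out = solve_simply_alt n a b c d x_0 y_0 m
instance (n : Int) (a : Int) (b : Int) (c : Int) (d : Int) (x_0 : Int) (y_0 : Int) (m : Int) (out : Int) : Decidable (Spec_solve_simply n a b c d x_0 y_0 m out) := by unfold Spec_solve_simply; infer_instance

-- ===== CLAIM (what is proved, stated in full; the proofs are below) =====
def Claim_equal_solve_simply : Prop := ∀ (n : Int) (a : Int) (b : Int) (c : Int) (d : Int) (x_0 : Int) (y_0 : Int) (m : Int), Dom_solve_simply n a b c d x_0 y_0 m → Pre_solve_simply n a b c d x_0 y_0 m → Spec_solve_simply n a b c d x_0 y_0 m (solve_simply n a b c d x_0 y_0 m)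

-- ===== LEMMAS AND PROOFS =====

-- reference counting functions (proof-only)
def pvPairCount (p : Int × Int) : List (Int × Int) → Int
  | [] => 0
  | q :: t => (t.countP (fun r => pvIsCenter p q r) : Int) + pvPairCount p t

def pvTripleCount : List (Int × Int) → Int
  | [] => 0
  | p :: t => pvPairCount p t + pvTripleCount t

def pvResIdx (p : Int × Int) : Int := 3 * (p.1 % 3) + p.2 % 3

def pvCombIdx (q : Int × Int) (r : Int × Int) : Int := 3 * ((q.1 + r.1) % 3) + (q.2 + r.2) % 3

def pvResCount (l : List (Int × Int)) (k : Int) : Int := (l.countP (fun p => pvResIdx p == k) : Int)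

def pvPairSumCount : List (Int × Int) → Int → Int
  | [], _ => 0
  | q :: t, k => (t.countP (fun r => pvCombIdx q r == k) : Int) + pvPairSumCount t k

-- the point stream the recurrence produces after the initial point
def pvPtsFrom (a : Int) (b : Int) (c : Int) (d : Int) (m : Int) : List Int → Int → Int → List (Int × Int)
  | [], _, _ => []
  | _ :: t, x, y =>
    let x' := PySem.Int.mod (a * x + b) m
    let y' := PySem.Int.mod (c * y + d) m
    (x', y') :: pvPtsFrom a b c d m t x' y'

lemma pvMod3 (q : Int) : PySem.Int.mod q 3 = q % 3 :=
  PySem.Int.mod_eq_emod_of_pos (by norm_num)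

lemma pvDiv3 (q : Int) : PySem.Int.floordiv q 3 = q / 3 :=
  PySem.Int.floordiv_eq_ediv_of_pos (by norm_num)

lemma pvGen_fold (a b c d m : Int) (r : List Int) : ∀ (x y : Int) (acc : List (Int × Int)),
    (r.foldl (fun (st : Int × Int × List (Int × Int)) _i =>
      let x := PySem.Int.mod (a * st.1 + b) m
      let y := PySem.Int.mod (c * st.2.1 + d) m
      (x, y, st.2.2 ++ [(x, y)])) (x, y, acc)).2.2
    = acc ++ pvPtsFrom a b c d m r x y := by
  induction r with
  | nil => intro x y acc; simp [pvPtsFrom]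
  | cons i t ih => intro x y acc; simp only [List.foldl_cons, ih, pvPtsFrom, List.append_assoc,
      List.singleton_append]

lemma pvAltFold {proc : (List Int × List Int × Int) → Int → Int → (List Int × List Int × Int)}
    (a b c d m : Int) (r : List Int) : ∀ (x y : Int) (st : List Int × List Int × Int),
    (r.foldl (fun (s : Int × Int × (List Int × List Int × Int)) _i =>
      let x := PySem.Int.mod (a * s.1 + b) m
      let y := PySem.Int.mod (c * s.2.1 + d) m
      (x, y, proc s.2.2 x y)) (x, y, st)).2.2
    = (pvPtsFrom a b c d m r x y).foldl (fun s p => proc s p.1 p.2) st := by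
  induction r with
  | nil => intro x y st; simp [pvPtsFrom]
  | cons i t ih => intro x y st; simp only [List.foldl_cons, ih, pvPtsFrom]

lemma pvIdx_iff (x y k : Int) (hk0 : 0 ≤ k) (hk9 : k < 9) (q : Int × Int) :
    (pvCombIdx q (x, y) == k) = (pvResIdx q == 3 * ((k / 3 - x % 3) % 3) + (k % 3 - y % 3) % 3) := by
  unfold pvCombIdx pvResIdx
  rw [Bool.eq_iff_iff]
  simp only [beq_iff_eq]
  omega

lemma pvResIdx_beq (x y s : Int) :
    (s == 3 * (x % 3) + y % 3) = (pvResIdx (x, y) == s) := by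
  unfold pvResIdx
  rw [Bool.eq_iff_iff]
  simp only [beq_iff_eq]
  omega

lemma pvLenPtsFrom (a b c d m : Int) : ∀ (r : List Int) (x y : Int),
    (pvPtsFrom a b c d m r x y).length = r.length := by
  intro r; induction r with
  | nil => intro x y; rfl
  | cons i t ih => intro x y; simp [pvPtsFrom, ih]

lemma pvGenPoints_eq (n a b c d x_0 y_0 m : Int) :
    pvGenPoints n a b c d x_0 y_0 m
      = (x_0, y_0) :: pvPtsFrom a b c d m (PySem.List.pyRange 1 n 1) x_0 y_0 := by
  unfold pvGenPoints
  rw [pvGen_fold]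
  simp

lemma pvIsCenter_perm (p q r : Int × Int) : pvIsCenter q r p = pvIsCenter p q r := by
  unfold pvIsCenter
  rw [show q.1 + r.1 + p.1 = p.1 + q.1 + r.1 by ring, show q.2 + r.2 + p.2 = p.2 + q.2 + r.2 by ring]

lemma pvPairCount_append (p r : Int × Int) (l : List (Int × Int)) :
    pvPairCount p (l ++ [r]) = pvPairCount p l + (l.countP (fun q => pvIsCenter p q r) : Int) := by
  induction l with
  | nil => simp [pvPairCount]
  | cons q t ih =>
    simp only [List.cons_append, pvPairCount, ih, List.countP_append, List.countP_cons,
      List.countP_nil]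
    push_cast
    ring_nf

lemma pvTripleCount_append (p : Int × Int) (l : List (Int × Int)) :
    pvTripleCount (l ++ [p]) = pvTripleCount l + pvPairCount p l := by
  induction l with
  | nil => simp [pvTripleCount, pvPairCount]
  | cons q t ih =>
    simp only [List.cons_append, pvTripleCount, ih, pvPairCount_append, pvPairCount]
    have h : (t.countP fun r => pvIsCenter q r p) = t.countP fun r => pvIsCenter p q r := by
      simp only [pvIsCenter_perm]
    rw [h]; ring

lemma pvPairSumCount_append (p : Int × Int) (l : List (Int × Int)) (k : Int) :
    pvPairSumCount (l ++ [p]) k = pvPairSumCount l k + (l.countP (fun q => pvCombIdx q p == k) : Int) := by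
  induction l with
  | nil => simp [pvPairSumCount]
  | cons q t ih =>
    simp only [List.cons_append, pvPairSumCount, ih, List.countP_append, List.countP_cons,
      List.countP_nil]
    push_cast
    ring_nf

lemma pvCenter_iff (p q r : Int × Int) :
    pvIsCenter p q r = (pvCombIdx q r == 3 * (-(p.1 % 3) % 3) + -(p.2 % 3) % 3) := by
  unfold pvIsCenter pvCombIdx
  rcases p with ⟨p1, p2⟩; rcases q with ⟨q1, q2⟩; rcases r with ⟨r1, r2⟩
  simp only [PySem.Int.mod_eq_emod_of_pos (by norm_num : (0:Int) < 3)]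
  by_cases h1 : (p1 + q1 + r1) % 3 = 0 <;> by_cases h2 : (p2 + q2 + r2) % 3 = 0 <;>
    simp [h1, h2] <;> omega

lemma pvPairCount_eq_pairSum (p : Int × Int) (l : List (Int × Int)) :
    pvPairCount p l = pvPairSumCount l (3 * (-(p.1 % 3) % 3) + -(p.2 % 3) % 3) := by
  induction l with
  | nil => rfl
  | cons q t ih =>
    simp only [pvPairCount, pvPairSumCount, ih, pvCenter_iff]

-- invariant of B's state
def pvInv (st : List Int × List Int × Int) (l : List (Int × Int)) : Prop :=
  st.1 = (PySem.List.pyRange 0 9 1).map (fun k => pvResCount l k) ∧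
  st.2.1 = (PySem.List.pyRange 0 9 1).map (fun k => pvPairSumCount l k) ∧
  st.2.2 = pvTripleCount l

lemma pvInv_init : pvInv (List.replicate 9 0, List.replicate 9 0, 0) [] := by
  refine ⟨?_, ?_, rfl⟩ <;> decide

lemma pvInv_step (st : List Int × List Int × Int) (l : List (Int × Int)) (x y : Int)
    (h : pvInv st l) : pvInv (pvProcess st x y) (l ++ [(x, y)]) := by
  obtain ⟨h1, h2, h3⟩ := h
  unfold pvProcess
  simp only [pvMod3, pvDiv3, h1, h2, h3]
  refine ⟨?_, ?_, ?_⟩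
  · -- single table: class counts gain 1 in the class of (x, y)
    apply List.map_congr_left
    intro s hs
    rw [PySem.List.mem_pyRange_one] at hs
    rw [PySem.List.pyGetD_map_pyRange_of_nonneg _ 9 s 0 hs.1 hs.2]
    unfold pvResCount
    rw [List.countP_append]
    simp only [List.countP_singleton]
    rw [pvResIdx_beq]
    push_cast
    by_cases hb : (pvResIdx (x, y) == s) = true <;> simp [hb]
  · -- pair table: sum-class k gains the count of the class pairing with (x, y) into k
    apply List.map_congr_left
    intro k hk
    rw [PySem.List.mem_pyRange_one] at hk
    rw [PySem.List.pyGetD_map_pyRange_of_nonneg _ 9 k 0 hk.1 hk.2]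
    have hidx0 : 0 ≤ 3 * ((k / 3 - x % 3) % 3) + (k % 3 - y % 3) % 3 := by omega
    have hidx9 : 3 * ((k / 3 - x % 3) % 3) + (k % 3 - y % 3) % 3 < 9 := by omega
    rw [PySem.List.pyGetD_map_pyRange_of_nonneg _ 9 _ 0 hidx0 hidx9]
    rw [pvPairSumCount_append]
    have h : (l.countP fun q => pvCombIdx q (x, y) == k)
        = l.countP fun q => pvResIdx q == 3 * ((k / 3 - x % 3) % 3) + (k % 3 - y % 3) % 3 := by
      apply List.countP_congr
      intro q _
      rw [pvIdx_iff x y k hk.1 hk.2]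
    rw [h]
    rfl
  · -- count: gains the pairs completing (x, y) to a divisible-by-3 triple
    have hc0 : 0 ≤ 3 * (-(x % 3) % 3) + -(y % 3) % 3 := by omega
    have hc9 : 3 * (-(x % 3) % 3) + -(y % 3) % 3 < 9 := by omega
    rw [PySem.List.pyGetD_map_pyRange_of_nonneg _ 9 _ 0 hc0 hc9]
    rw [pvTripleCount_append, pvPairCount_eq_pairSum]

lemma pvInv_fold (L : List (Int × Int)) : ∀ (st : List Int × List Int × Int) (l : List (Int × Int)),
    pvInv st l → pvInv (L.foldl (fun s p => pvProcess s p.1 p.2) st) (l ++ L) := by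
  induction L with
  | nil => intro st l h; simpa using h
  | cons p t ih =>
    intro st l h
    have := ih (pvProcess st p.1 p.2) (l ++ [p]) (pvInv_step st l p.1 p.2 h)
    simpa using this

lemma pvAlt_eq_fold (n a b c d x_0 y_0 m : Int) :
    solve_simply_alt n a b c d x_0 y_0 m
      = (((x_0, y_0) :: pvPtsFrom a b c d m (PySem.List.pyRange 1 n 1) x_0 y_0).foldl
          (fun s p => pvProcess s p.1 p.2) (List.replicate 9 0, List.replicate 9 0, 0)).2.2 := by
  unfold solve_simply_alt
  simp only []
  rw [pvAltFold (proc := pvProcess)]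
  simp [List.foldl_cons]

lemma pvAlt_eq_tripleCount (n a b c d x_0 y_0 m : Int) :
    solve_simply_alt n a b c d x_0 y_0 m
      = pvTripleCount ((x_0, y_0) :: pvPtsFrom a b c d m (PySem.List.pyRange 1 n 1) x_0 y_0) := by
  rw [pvAlt_eq_fold]
  have := pvInv_fold ((x_0, y_0) :: pvPtsFrom a b c d m (PySem.List.pyRange 1 n 1) x_0 y_0)
    (List.replicate 9 0, List.replicate 9 0, 0) [] pvInv_init
  simpa using this.2.2

lemma pvPairCount_short (p : Int × Int) (l : List (Int × Int)) (h : l.length ≤ 1) :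
    pvPairCount p l = 0 := by
  match l, h with
  | [], _ => rfl
  | [q], _ => simp [pvPairCount]

lemma pvTripleCount_short (l : List (Int × Int)) (h : l.length ≤ 2) : pvTripleCount l = 0 := by
  match l, h with
  | [], _ => rfl
  | [q], _ => simp [pvTripleCount, pvPairCount]
  | [q, r], _ => simp [pvTripleCount, pvPairCount]

-- A-side loop characterisations
lemma pvInnerLoop (P : List (Int × Int)) (p1 p2 : Int × Int) (j cnt : Int) (hj : 0 ≤ j) :
    (PySem.List.pyRange j (P.length : Int) 1).foldl
      (fun count k => if pvIsCenter p1 p2 (PySem.List.pyGetD P k (0, 0)) == true then count + 1 else count) cnt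
    = cnt + ((P.drop j.toNat).countP (fun r => pvIsCenter p1 p2 r) : Int) := by
  have h1 := PySem.List.foldl_pyRange_pyGetD P (0, 0)
      (fun (count : Int) p => if pvIsCenter p1 p2 p == true then count + 1 else count) cnt hj
  have h2 := PySem.List.foldl_count_if (fun r => pvIsCenter p1 p2 r) (P.drop j.toNat) cnt
  simp only [PySem.List.len] at h1
  rw [h1]
  simpa using h2

lemma pvMidLoop (P : List (Int × Int)) (p1 : Int × Int) :
    ∀ (K : Nat) (j cnt : Int), 0 ≤ j → ((P.length : Int) - 1 - j).toNat = K →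
    (PySem.List.pyRange j ((P.length : Int) - 1) 1).foldl
      (fun count j' => (PySem.List.pyRange (j' + 1) (P.length : Int) 1).foldl
        (fun count k => if pvIsCenter p1 (PySem.List.pyGetD P j' (0, 0)) (PySem.List.pyGetD P k (0, 0)) == true then count + 1 else count) count) cnt
    = cnt + pvPairCount p1 (P.drop j.toNat) := by
  intro K
  induction K with
  | zero =>
    intro j cnt hj hK
    rw [PySem.List.pyRange_one_eq_nil (by omega)]
    have hlen : (P.drop j.toNat).length ≤ 1 := by rw [List.length_drop]; omega
    simp [pvPairCount_short p1 _ hlen]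
  | succ K ih =>
    intro j cnt hj hK
    have hjlt : j < (P.length : Int) - 1 := by omega
    rw [PySem.List.pyRange_one_cons hjlt, List.foldl_cons]
    rw [pvInnerLoop P p1 (PySem.List.pyGetD P j (0, 0)) (j + 1) cnt (by omega)]
    rw [ih (j + 1) _ (by omega) (by omega)]
    have hjl : j.toNat < P.length := by omega
    have hd : P.drop j.toNat = P[j.toNat] :: P.drop (j.toNat + 1) := List.drop_eq_getElem_cons hjl
    have hget : PySem.List.pyGetD P j (0, 0) = P[j.toNat] :=
      PySem.List.pyGetD_eq_getElem P (0, 0) hj (by omega)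
    have htn : (j + 1).toNat = j.toNat + 1 := by omega
    rw [htn, hd, pvPairCount, hget]
    ring

lemma pvOuterLoop (P : List (Int × Int)) :
    ∀ (K : Nat) (i cnt : Int), 0 ≤ i → ((P.length : Int) - 2 - i).toNat = K →
    (PySem.List.pyRange i ((P.length : Int) - 2) 1).foldl
      (fun count i' => (PySem.List.pyRange (i' + 1) ((P.length : Int) - 1) 1).foldl
        (fun count j' => (PySem.List.pyRange (j' + 1) (P.length : Int) 1).foldl
          (fun count k => if pvIsCenter (PySem.List.pyGetD P i' (0, 0)) (PySem.List.pyGetD P j' (0, 0)) (PySem.List.pyGetD P k (0, 0)) == true then count + 1 else count) count) count) cnt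
    = cnt + pvTripleCount (P.drop i.toNat) := by
  intro K
  induction K with
  | zero =>
    intro i cnt hi hK
    rw [PySem.List.pyRange_one_eq_nil (by omega)]
    have hlen : (P.drop i.toNat).length ≤ 2 := by rw [List.length_drop]; omega
    simp [pvTripleCount_short _ hlen]
  | succ K ih =>
    intro i cnt hi hK
    have hilt : i < (P.length : Int) - 2 := by omega
    rw [PySem.List.pyRange_one_cons hilt, List.foldl_cons]
    rw [pvMidLoop P (PySem.List.pyGetD P i (0, 0)) ((P.length : Int) - 1 - (i + 1)).toNat (i + 1)
      cnt (by omega) rfl]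
    rw [ih (i + 1) _ (by omega) (by omega)]
    have hil : i.toNat < P.length := by omega
    have hd : P.drop i.toNat = P[i.toNat] :: P.drop (i.toNat + 1) := List.drop_eq_getElem_cons hil
    have hget : PySem.List.pyGetD P i (0, 0) = P[i.toNat] :=
      PySem.List.pyGetD_eq_getElem P (0, 0) hi (by omega)
    have htn : (i + 1).toNat = i.toNat + 1 := by omega
    rw [htn, hd, pvTripleCount, hget]
    ring

lemma pvA_eq_tripleCount (n a b c d x_0 y_0 m : Int) :
    solve_simply n a b c d x_0 y_0 m
      = pvTripleCount ((x_0, y_0) :: pvPtsFrom a b c d m (PySem.List.pyRange 1 n 1) x_0 y_0) := by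
  unfold solve_simply
  rw [pvGenPoints_eq]
  set P := (x_0, y_0) :: pvPtsFrom a b c d m (PySem.List.pyRange 1 n 1) x_0 y_0 with hPdef
  by_cases hn : n ≤ 0
  · rw [PySem.List.pyRange_one_eq_nil (show n - 2 ≤ 0 by omega)]
    have : P = [(x_0, y_0)] := by
      rw [hPdef, PySem.List.pyRange_one_eq_nil (show n ≤ 1 by omega)]
      rfl
    rw [this]
    simp [List.foldl_nil, pvTripleCount, pvPairCount]
  · have hlen : (P.length : Int) = n := by
      rw [hPdef]
      simp [pvLenPtsFrom, PySem.List.length_pyRange_one]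
      omega
    rw [show n - 2 = (P.length : Int) - 2 by omega, show n - 1 = (P.length : Int) - 1 by omega,
      show n = (P.length : Int) by omega]
    rw [pvOuterLoop P ((P.length : Int) - 2 - 0).toNat 0 0 (by omega) rfl]
    simp

-- ===== VERDICT (by name: the statement is the Claim_ definition above) =====
theorem solve_simply_spec : Claim_equal_solve_simply := by
  intro n a b c d x_0 y_0 m _hDom _hPre
  unfold Spec_solve_simply
  rw [pvA_eq_tripleCount, pvAlt_eq_tripleCount]
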